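-- pv_equiv track=rewrite | github.com/OPpuolitaival/audio-tool | src/audio_tool/transcriber.py | check_repeated_words
-- ===== SOURCE A (Python) =====
-- def check_repeated_words(text: str) -> int:
--     """Check for consecutive repetitions of words or phrases."""
--     if not text or not isinstance(text, str):
--         return 0
--
--     text = " ".join(text.lower().split())
--     words = text.split()
--
--     if not words:
--         return 0
--
--     max_count = 1
--
--     # Check for single word repetitions
--     i = 0
--     while i < len(words):
--         current_word = words[i]
--         count = 1
--         while i + count < len(words) and words[i + count] == current_word:
--             count += 1
--         max_count = max(max_count, count)
--         i += count
--
--     # Check for multi-word phrase repetitions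
--     for phrase_length in range(2, 4):
--         if len(words) < phrase_length * 2:
--             continue
--         i = 0
--         while i <= len(words) - phrase_length:
--             phrase = tuple(words[i : i + phrase_length])
--             phrase_count = 1
--             next_pos = i + phrase_length
--             while next_pos <= len(words) - phrase_length:
--                 next_phrase = tuple(words[next_pos : next_pos + phrase_length])
--                 if next_phrase == phrase:
--                     phrase_count += 1
--                     next_pos += phrase_length
--                 else:
--                     break
--             max_count = max(max_count, phrase_count)
--             if phrase_count > 1:
--                 i = next_pos
--             else:
--                 i += 1
--
--     return max_count
-- ===== SOURCE B (Python) =====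
-- from itertools import groupby
--
--
-- def check_repeated_words(text: str) -> int:
--     """Check for consecutive repetitions of words or phrases."""
--     words = " ".join(text.lower().split()).split()
--     if not words:
--         return 0
--
--     # Single words: max run length via groupby.
--     best = max(len(list(g)) for _, g in groupby(words))
--
--     n = len(words)
--     for p in (2, 3):
--         # c[i] = number of consecutive equal non-overlapping p-blocks starting at i,
--         # filled right-to-left once (no nested rescans).
--         c = [1] * n
--         for i in range(n - 2 * p, -1, -1):
--             if words[i:i + p] == words[i + p:i + 2 * p]:
--                 c[i] = c[i + p] + 1
--         i = 0
--         while i + p <= n: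
--             best = max(best, c[i])
--             i += p * c[i] if c[i] > 1 else 1
--     return best
-- ===== Notes on version B (the rewrite author's own statement) =====
-- stated objective: alternative
-- what changed: The index-jumping while-loop over single words is replaced by an itertools.groupby run split, and for each phrase length the nested block-recounting while-loop is replaced by a run-length table c[i] filled once right-to-left (c[i] = c[i+p]+1 on equal adjacent blocks) that the outer scan merely indexes.
import Mathlib
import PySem

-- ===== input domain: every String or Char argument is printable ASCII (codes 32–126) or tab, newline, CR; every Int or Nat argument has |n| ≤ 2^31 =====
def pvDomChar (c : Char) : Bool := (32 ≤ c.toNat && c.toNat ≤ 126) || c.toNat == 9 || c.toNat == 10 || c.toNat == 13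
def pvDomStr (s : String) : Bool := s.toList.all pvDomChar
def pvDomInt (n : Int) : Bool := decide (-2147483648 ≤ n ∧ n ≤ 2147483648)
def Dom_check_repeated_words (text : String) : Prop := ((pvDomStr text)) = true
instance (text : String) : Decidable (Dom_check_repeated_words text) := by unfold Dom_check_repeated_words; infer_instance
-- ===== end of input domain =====

-- B replaces A's nested re-scanning while-loops by a groupby-style run split (single words)
-- and a per-phrase-length run-length table filled once right-to-left (phrases); same return value.

-- ===== PORT A =====
-- small termination facts, cited by the loops' decreasing_by (kept tiny on purpose)
theorem pv_dec1 (a b : Nat) (h : b < a) : a - (b + 1) < a - b :=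
  Nat.sub_succ_lt_self a b h
theorem pv_dec2 (a i k : Nat) (hk : 1 ≤ k) (h : i < a) : a - (i + k) < a - i :=
  Nat.lt_of_le_of_lt (Nat.sub_le_sub_left (Nat.add_le_add_left hk i) a)
    (Nat.sub_succ_lt_self a i h)
theorem pv_dec3 (a j p : Nat) (hp : 0 < p) (h : j + p ≤ a) : a - (j + p) < a - j :=
  Nat.lt_of_le_of_lt (Nat.sub_le_sub_left (Nat.add_le_add_left hp j) a)
    (Nat.sub_succ_lt_self a j (Nat.lt_of_lt_of_le (Nat.lt_add_of_pos_right hp) h))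
theorem pv_dec4 (a i p x : Nat) (h : i + p ≤ a) (hp : 0 < p) (hx : i + p ≤ x) :
    a + 1 - x < a + 1 - i :=
  Nat.lt_of_le_of_lt (Nat.sub_le_sub_left hx (a + 1))
    (pv_dec3 (a + 1) i p hp (Nat.le_trans h (Nat.le_succ a)))
theorem pv_dec5 (a i p : Nat) (h : i + p ≤ a) : a + 1 - (i + 1) < a + 1 - i :=
  Nat.sub_succ_lt_self (a + 1) i (Nat.lt_succ_of_le (Nat.le_trans (Nat.le_add_right i p) h))

-- words[i:i+p] with 0 ≤ i, 0 ≤ p : Python's clamping slice = drop/take (exact for nonnegative bounds)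
def pvSeg (ws : List String) (i p : Nat) : List String := (ws.drop i).take p

-- inner `while i + count < len(words) and words[i + count] == current_word: count += 1`
-- (index is in range at each read, so List.getD is exact)
def pvCntw (ws : List String) (w : String) (i c : Nat) : Nat :=
  if h : i + c < ws.length ∧ ws.getD (i + c) "" = w then pvCntw ws w i (c + 1) else c
termination_by ws.length - (i + c)
decreasing_by exact pv_dec1 ws.length (i + c) h.1

-- needed by pvLoop1's termination
theorem pvCntw_ge (ws : List String) (w : String) (i c : Nat) : c ≤ pvCntw ws w i c := by
  fun_induction pvCntw ws w i c <;> omega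

-- outer single-word while-loop
def pvLoop1 (ws : List String) (i m : Nat) : Nat :=
  if h : i < ws.length then
    pvLoop1 ws (i + pvCntw ws (ws.getD i "") i 1) (max m (pvCntw ws (ws.getD i "") i 1))
  else m
termination_by ws.length - i
decreasing_by exact pv_dec2 ws.length i _ (pvCntw_ge ws (ws.getD i "") i 1) h

-- inner `while next_pos <= len(words) - phrase_length: …` (returns (phrase_count, next_pos))
def pvPcnt (ws ph : List String) (p : Nat) (hp : 0 < p) (c j : Nat) : Nat × Nat :=
  if h : j + p ≤ ws.length ∧ pvSeg ws j p = ph then pvPcnt ws ph p hp (c + 1) (j + p)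
  else (c, j)
termination_by ws.length - j
decreasing_by exact pv_dec3 ws.length j p hp h.1

-- needed by pvLoop2's termination
theorem pvPcnt_snd_ge (ws ph : List String) (p : Nat) (hp : 0 < p) (c j : Nat) :
    j ≤ (pvPcnt ws ph p hp c j).2 := by
  fun_induction pvPcnt ws ph p hp c j with
  | case1 c j h ih => omega
  | case2 c j h => omega

-- outer phrase while-loop: `while i <= len(words) - phrase_length` (⟺ i + p ≤ len over ints)
def pvLoop2 (ws : List String) (p : Nat) (hp : 0 < p) (i m : Nat) : Nat :=
  if h : i + p ≤ ws.length then
    let r := pvPcnt ws (pvSeg ws i p) p hp 1 (i + p)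
    pvLoop2 ws p hp (if 1 < r.1 then r.2 else i + 1) (max m r.1)
  else m
termination_by ws.length + 1 - i
decreasing_by
  split
  · exact pv_dec4 ws.length i p _ h hp (pvPcnt_snd_ge ws (pvSeg ws i p) p hp 1 (i + p))
  · exact pv_dec5 ws.length i p h

def check_repeated_words (text : String) : Int :=
  if text = "" then 0
  else
    let ws := PySem.Str.split₀ (PySem.Str.join " " (PySem.Str.split₀ (PySem.Str.lower text)))
    if ws = [] then 0
    else
      let m1 := pvLoop1 ws 0 1
      let m2 := if ws.length < 4 then m1 else pvLoop2 ws 2 (Nat.succ_pos 1) 0 m1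
      let m3 := if ws.length < 6 then m2 else pvLoop2 ws 3 (Nat.succ_pos 2) 0 m2
      (m3 : Int)

-- ===== PORT B =====
-- hand port of itertools.groupby: the (value, run-length) pairs of the list
def pvRunSplit : List String → List (String × Nat)
  | [] => []
  | x :: xs =>
    match pvRunSplit xs with
    | [] => [(x, 1)]
    | (y, k) :: rest => if x = y then (x, k + 1) :: rest else (x, 1) :: (y, k) :: rest

-- `c = [1]*n; for i in range(n-2p, -1, -1): if words[i:i+p]==words[i+p:i+2p]: c[i] = c[i+p]+1`
-- (every index read/written is in range, so List.getD / List.set are exact)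
def pvTable (ws : List String) (p : Nat) : List Nat :=
  (PySem.List.pyRange ((ws.length : Int) - 2 * p) (-1) (-1)).foldl
    (fun c i =>
      if pvSeg ws i.toNat p = pvSeg ws (i.toNat + p) p then
        c.set i.toNat (c.getD (i.toNat + p) 0 + 1)
      else c)
    (List.replicate ws.length 1)

-- `while i + p <= n: best = max(best, c[i]); i += p*c[i] if c[i] > 1 else 1`
def pvScan (ws : List String) (tab : List Nat) (p : Nat) (hp : 0 < p) (i m : Nat) : Nat :=
  if h : i + p ≤ ws.length then
    pvScan ws tab p hp
      (if 1 < tab.getD i 0 then i + p * tab.getD i 0 else i + 1) (max m (tab.getD i 0))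
  else m
termination_by ws.length + 1 - i
decreasing_by
  split
  · next hk =>
      exact pv_dec4 ws.length i p _ h hp
        (Nat.add_le_add_left (Nat.le_mul_of_pos_right p (Nat.lt_trans Nat.zero_lt_one hk)) i)
  · exact pv_dec5 ws.length i p h

def check_repeated_words_alt (text : String) : Int :=
  let ws := PySem.Str.split₀ (PySem.Str.join " " (PySem.Str.split₀ (PySem.Str.lower text)))
  if ws = [] then 0
  else
    -- max over the (nonempty) groupby run lengths; lengths are ≥ 1 so foldl max 0 is exact
    let b1 := ((pvRunSplit ws).map Prod.snd).foldl max 0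
    let b2 := pvScan ws (pvTable ws 2) 2 (Nat.succ_pos 1) 0 b1
    let b3 := pvScan ws (pvTable ws 3) 3 (Nat.succ_pos 2) 0 b2
    (b3 : Int)

-- ===== PRECONDITION & SPEC =====
def Spec_check_repeated_words (text : String) (out : Int) : Prop := out = check_repeated_words_alt text
instance (text : String) (out : Int) : Decidable (Spec_check_repeated_words text out) := by unfold Spec_check_repeated_words; infer_instance

-- ===== CLAIM (what is proved, stated in full; the proofs are below) =====
def Claim_equal_check_repeated_words : Prop := ∀ (text : String), Dom_check_repeated_words text → Spec_check_repeated_words text (check_repeated_words text)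

-- ===== LEMMAS AND PROOFS =====

-- length of the leading run of w
def pvLead (w : String) : List String → Nat
  | [] => 0
  | x :: xs => if x = w then pvLead w xs + 1 else 0

theorem cntw_lead (ws : List String) (w : String) :
    ∀ i c, pvCntw ws w i c = c + pvLead w (ws.drop (i + c)) := by
  intro i c
  fun_induction pvCntw ws w i c with
  | case1 c h ih =>
      rw [ih, List.drop_eq_getElem_cons h.1]
      have hw : ws[i + c] = w := by
        have := h.2; rwa [List.getD_eq_getElem ws "" h.1] at this
      simp [pvLead, hw, Nat.add_assoc]; omega
  | case2 c h =>
      by_cases hin : i + c < ws.length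
      · have hne : ws[i + c] ≠ w := by
          intro hcon
          exact h ⟨hin, by rw [List.getD_eq_getElem ws "" hin]; exact hcon⟩
        rw [List.drop_eq_getElem_cons hin]
        simp [pvLead, hne]
      · rw [List.drop_eq_nil_of_le (by omega)]
        simp [pvLead]

-- groupby run decomposition
theorem runSplit_cons (w : String) (t : List String) :
    pvRunSplit (w :: t) = (w, 1 + pvLead w t) :: pvRunSplit (t.drop (pvLead w t)) := by
  induction t generalizing w with
  | nil => simp [pvRunSplit, pvLead]
  | cons y t' ih =>
      show (match pvRunSplit (y :: t') with
            | [] => [(w, 1)]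
            | (z, k) :: rest => if w = z then (w, k + 1) :: rest else (w, 1) :: (z, k) :: rest)
          = _
      rw [ih y]
      by_cases hyw : w = y
      · subst hyw
        simp [pvLead, List.drop_succ_cons, Nat.add_assoc]
      · have hyw' : ¬ (y = w) := fun hc => hyw hc.symm
        simp only [if_neg hyw, pvLead, if_neg hyw', List.drop_zero]
        rw [← ih y]

theorem foldl_max_out (l : List Nat) : ∀ a, l.foldl max a = max a (l.foldl max 0) := by
  induction l with
  | nil => intro a; simp
  | cons b l ih => intro a; simp only [List.foldl]; rw [ih (max a b), ih (max 0 b)]; omega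

def runsMax (l : List String) : Nat := ((pvRunSplit l).map Prod.snd).foldl max 0

theorem runsMax_cons (w : String) (t : List String) :
    runsMax (w :: t) = max (1 + pvLead w t) (runsMax (t.drop (pvLead w t))) := by
  unfold runsMax
  rw [runSplit_cons]
  simp only [List.map_cons, List.foldl_cons]
  rw [foldl_max_out]
  omega

theorem loop1_eq (ws : List String) : ∀ i m, pvLoop1 ws i m = max m (runsMax (ws.drop i)) := by
  intro i m
  fun_induction pvLoop1 ws i m with
  | case1 i m h ih =>
      rw [ih]
      have hc : pvCntw ws (ws.getD i "") i 1 = 1 + pvLead (ws.getD i "") (ws.drop (i + 1)) :=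
        cntw_lead ws (ws.getD i "") i 1
      have hd : ws.drop i = ws[i] :: ws.drop (i + 1) := List.drop_eq_getElem_cons h
      have hg : ws.getD i "" = ws[i] := List.getD_eq_getElem ws "" h
      rw [hg] at hc ⊢
      rw [hc, hd, runsMax_cons, List.drop_drop]
      rw [show i + 1 + pvLead ws[i] (ws.drop (i + 1))
            = i + (1 + pvLead ws[i] (ws.drop (i + 1))) by omega]
      omega
  | case2 i m h =>
      rw [List.drop_eq_nil_of_le (by omega)]
      simp [runsMax, pvRunSplit]

theorem pv_dec6 (a i p : Nat) (hp : 0 < p) (h : i + 2 * p ≤ a) : a - (i + p) < a - i :=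
  pv_dec3 a i p hp (Nat.le_trans (Nat.add_le_add_left (Nat.le_mul_of_pos_left p (Nat.succ_pos 1)) i) h)

-- abstract number of consecutive equal non-overlapping p-blocks starting at i
def cntP (ws : List String) (p : Nat) (hp : 0 < p) (i : Nat) : Nat :=
  if h : i + 2 * p ≤ ws.length ∧ pvSeg ws i p = pvSeg ws (i + p) p then cntP ws p hp (i + p) + 1
  else 1
termination_by ws.length - i
decreasing_by exact pv_dec6 ws.length i p hp h.1

theorem cntP_pos (ws : List String) (p : Nat) (hp : 0 < p) (i : Nat) : 1 ≤ cntP ws p hp i := by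
  fun_induction cntP ws p hp i <;> omega

theorem pcnt_eq (ws : List String) (p : Nat) (hp : 0 < p) :
    ∀ i c, pvPcnt ws (pvSeg ws i p) p hp c (i + p)
      = (c + cntP ws p hp i - 1, i + p * cntP ws p hp i) := by
  intro i c
  fun_induction cntP ws p hp i generalizing c with
  | case1 i h ih =>
      rw [pvPcnt.eq_def]
      rw [dif_pos (show i + p + p ≤ ws.length ∧ pvSeg ws (i + p) p = pvSeg ws i p by
        exact ⟨by omega, h.2.symm⟩)]
      rw [h.2, ih (c + 1)]
      have h1 : c + 1 + cntP ws p hp (i + p) - 1 = c + (cntP ws p hp (i + p) + 1) - 1 := by omega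
      have h2 : i + p + p * cntP ws p hp (i + p) = i + p * (cntP ws p hp (i + p) + 1) := by
        rw [Nat.mul_succ]; omega
      rw [h1, h2]
  | case2 i h =>
      rw [pvPcnt.eq_def]
      rw [dif_neg (by
        intro hcon
        exact h ⟨by omega, hcon.2.symm⟩)]
      simp

theorem loop2_eq_scan (ws : List String) (p : Nat) (hp : 0 < p) (tab : List Nat)
    (htab : ∀ j, j < ws.length → tab.getD j 0 = cntP ws p hp j) :
    ∀ i m, pvLoop2 ws p hp i m = pvScan ws tab p hp i m := by
  intro i m
  fun_induction pvLoop2 ws p hp i m with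
  | case1 i m h r ih =>
      rw [pvScan.eq_def, dif_pos h]
      have hi : i < ws.length := by omega
      have hr := pcnt_eq ws p hp i 1
      have hfst : r.1 = cntP ws p hp i := by
        show (pvPcnt ws (pvSeg ws i p) p hp 1 (i + p)).1 = _
        rw [hr]; have := cntP_pos ws p hp i; omega
      have hsnd : r.2 = i + p * cntP ws p hp i := by
        show (pvPcnt ws (pvSeg ws i p) p hp 1 (i + p)).2 = _
        rw [hr]
      rw [hfst, hsnd] at ih ⊢
      rw [htab i hi]
      exact ih
  | case2 i m h =>
      rw [pvScan.eq_def, dif_neg h]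

theorem pv_getD_set_self (l : List Nat) (i v : Nat) (h : i < l.length) :
    (l.set i v).getD i 0 = v := by
  simp [List.getD_eq_getElem?_getD, h]

theorem pv_getD_set_ne (l : List Nat) (i j v : Nat) (h : i ≠ j) :
    (l.set i v).getD j 0 = l.getD j 0 := by
  simp [List.getD_eq_getElem?_getD, List.getElem?_set_ne h]

theorem pv_getD_replicate (n i : Nat) (h : i < n) : (List.replicate n (1 : Nat)).getD i 0 = 1 := by
  simp [List.getD_eq_getElem?_getD, h]

-- one backward-fill step establishes cntP at the processed index and preserves the invariant
theorem tab_step (ws : List String) (p : Nat) (hp : 0 < p) (hn : 2 * p ≤ ws.length)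
    (kk : Nat) (c : List Nat) (hk : kk ≤ ws.length - 2 * p) (hlen : c.length = ws.length)
    (hhi : ∀ j, kk < j → j < ws.length → c.getD j 0 = cntP ws p hp j)
    (hlo : ∀ j, j ≤ kk → c.getD j 0 = 1) :
    (if pvSeg ws kk p = pvSeg ws (kk + p) p then
        c.set kk (c.getD (kk + p) 0 + 1) else c).length = ws.length
    ∧ (∀ j, kk ≤ j → j < ws.length →
        (if pvSeg ws kk p = pvSeg ws (kk + p) p then
          c.set kk (c.getD (kk + p) 0 + 1) else c).getD j 0 = cntP ws p hp j)
    ∧ (∀ j, j < kk →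
        (if pvSeg ws kk p = pvSeg ws (kk + p) p then
          c.set kk (c.getD (kk + p) 0 + 1) else c).getD j 0 = 1) := by
  by_cases hEq : pvSeg ws kk p = pvSeg ws (kk + p) p
  · simp only [if_pos hEq]
    refine ⟨by simp [hlen], ?_, ?_⟩
    · intro j hj1 hj2
      by_cases hjk : j = kk
      · subst hjk
        rw [pv_getD_set_self c j _ (by omega), hhi (j + p) (by omega) (by omega)]
        conv_rhs => rw [cntP.eq_def]
        rw [dif_pos (⟨by omega, hEq⟩ : j + 2 * p ≤ ws.length ∧ pvSeg ws j p = pvSeg ws (j + p) p)]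
      · rw [pv_getD_set_ne c kk j _ (fun hc => hjk hc.symm)]
        exact hhi j (by omega) hj2
    · intro j hj
      rw [pv_getD_set_ne c kk j _ (by omega)]
      exact hlo j (by omega)
  · simp only [if_neg hEq]
    refine ⟨hlen, ?_, fun j hj => hlo j (by omega)⟩
    intro j hj1 hj2
    by_cases hjk : j = kk
    · subst hjk
      rw [hlo j le_rfl, cntP.eq_def, dif_neg (fun hcon => hEq hcon.2)]
    · exact hhi j (by omega) hj2

-- the backward fill computes cntP at every index (invariant induction over the countdown range)
theorem tab_aux (ws : List String) (p : Nat) (hp : 0 < p) (hn : 2 * p ≤ ws.length) :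
    ∀ (k : Nat) (c : List Nat), k ≤ ws.length - 2 * p → c.length = ws.length →
      (∀ j, k < j → j < ws.length → c.getD j 0 = cntP ws p hp j) →
      (∀ j, j ≤ k → c.getD j 0 = 1) →
      ∀ j, j < ws.length →
        ((PySem.List.pyRange (k : Int) (-1) (-1)).foldl
          (fun c i =>
            if pvSeg ws i.toNat p = pvSeg ws (i.toNat + p) p then
              c.set i.toNat (c.getD (i.toNat + p) 0 + 1)
            else c) c).getD j 0 = cntP ws p hp j := by
  intro k
  induction k with
  | zero =>
      intro c hk hlen hhi hlo j hj
      rw [PySem.List.pyRange_neg_one_cons (by omega),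
        PySem.List.pyRange_neg_one_eq_nil (by omega)]
      simp only [List.foldl_cons, List.foldl_nil, Int.toNat_natCast]
      have hstep := tab_step ws p hp hn 0 c hk hlen hhi hlo
      exact hstep.2.1 j (by omega) hj
  | succ k ih =>
      intro c hk hlen hhi hlo j hj
      rw [PySem.List.pyRange_neg_one_cons (by omega)]
      rw [show ((k + 1 : Nat) : Int) - 1 = ((k : Nat) : Int) by push_cast; ring]
      simp only [List.foldl_cons, Int.toNat_natCast]
      have hstep := tab_step ws p hp hn (k + 1) c hk hlen hhi hlo
      exact ih _ (by omega) hstep.1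
        (fun j hj1 hj2 => hstep.2.1 j (by omega) hj2)
        (fun j hj1 => hstep.2.2 j (by omega)) j hj

theorem table_getD (ws : List String) (p : Nat) (hp : 0 < p) :
    ∀ j, j < ws.length → (pvTable ws p).getD j 0 = cntP ws p hp j := by
  intro j hj
  unfold pvTable
  by_cases hn : 2 * p ≤ ws.length
  · rw [show (ws.length : Int) - 2 * p = ((ws.length - 2 * p : Nat) : Int) by
      rw [Int.natCast_sub (by omega)]; push_cast; ring]
    exact tab_aux ws p hp hn (ws.length - 2 * p) (List.replicate ws.length 1)
      le_rfl (List.length_replicate)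
      (fun j' hj1 hj2 => by
        rw [pv_getD_replicate _ _ hj2, cntP.eq_def, dif_neg (fun hcon => by omega)])
      (fun j' hj1 => pv_getD_replicate _ _ (by omega)) j hj
  · rw [PySem.List.pyRange_neg_one_eq_nil (by omega)]
    simp only [List.foldl_nil]
    rw [pv_getD_replicate _ _ hj, cntP.eq_def, dif_neg (fun hcon => by omega)]

-- for n < 2p the phrase pass returns m unchanged (every count is 1 and m ≥ 1)
theorem loop2_small_aux (ws : List String) (p : Nat) (hp : 0 < p) (hs : ws.length < 2 * p) :
    ∀ i m, pvLoop2 ws p hp i m = if i + p ≤ ws.length then max m 1 else m := by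
  intro i m
  fun_induction pvLoop2 ws p hp i m with
  | case1 i m h r ih =>
      rw [if_pos h]
      have hc : cntP ws p hp i = 1 := by
        rw [cntP.eq_def, dif_neg (by intro hcon; omega)]
      have hfst : r.1 = 1 := by
        show (pvPcnt ws (pvSeg ws i p) p hp 1 (i + p)).1 = 1
        rw [pcnt_eq ws p hp i 1, hc]
      rw [hfst] at ih ⊢
      rw [dif_neg (show ¬ (1 < 1) by omega)] at ih
      rw [if_neg (show ¬ (1 < 1) by omega)]
      rw [ih]
      split <;> omega
  | case2 i m h => rw [if_neg h]

theorem loop2_small (ws : List String) (p : Nat) (hp : 0 < p) (hs : ws.length < 2 * p)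
    (i m : Nat) (hm : 1 ≤ m) : pvLoop2 ws p hp i m = m := by
  rw [loop2_small_aux ws p hp hs i m]
  split <;> omega

theorem runsMax_pos (w : String) (t : List String) : 1 ≤ runsMax (w :: t) := by
  rw [runsMax_cons]; omega

theorem scan_ge (ws : List String) (tab : List Nat) (p : Nat) (hp : 0 < p) :
    ∀ i m, m ≤ pvScan ws tab p hp i m := by
  intro i m
  fun_induction pvScan ws tab p hp i m with
  | case1 i m h ih => exact le_trans (Nat.le_max_left _ _) ih
  | case2 i m h => omega

-- ===== VERDICT (by name: the statement is the Claim_ definition above) =====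
theorem check_repeated_words_spec : Claim_equal_check_repeated_words := by
  intro text _
  unfold Spec_check_repeated_words
  simp only [check_repeated_words, check_repeated_words_alt]
  by_cases ht : text = ""
  · subst ht
    have hnil : PySem.Str.split₀ (PySem.Str.join " " (PySem.Str.split₀ (PySem.Str.lower ""))) = [] := by
      decide
    rw [if_pos rfl, hnil]
    norm_num
  · rw [if_neg ht]
    generalize PySem.Str.split₀ (PySem.Str.join " " (PySem.Str.split₀ (PySem.Str.lower text))) = ws
    cases ws with
    | nil => norm_num
    | cons w t =>
      have hne : (w :: t) ≠ [] := by simp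
      rw [if_neg hne, if_neg hne]
      have hm1 : pvLoop1 (w :: t) 0 1 = runsMax (w :: t) := by
        rw [loop1_eq]
        simp only [List.drop_zero]
        have := runsMax_pos w t
        omega
      have hone : 1 ≤ runsMax (w :: t) := runsMax_pos w t
      have hsc2 : ∀ m, pvLoop2 (w :: t) 2 (by omega) 0 m
          = pvScan (w :: t) (pvTable (w :: t) 2) 2 (by omega) 0 m :=
        fun m => loop2_eq_scan (w :: t) 2 (by omega) (pvTable (w :: t) 2)
          (table_getD (w :: t) 2 (by omega)) 0 m
      have hsc3 : ∀ m, pvLoop2 (w :: t) 3 (by omega) 0 m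
          = pvScan (w :: t) (pvTable (w :: t) 3) 3 (by omega) 0 m :=
        fun m => loop2_eq_scan (w :: t) 3 (by omega) (pvTable (w :: t) 3)
          (table_getD (w :: t) 3 (by omega)) 0 m
      have hrm : ((pvRunSplit (w :: t)).map Prod.snd).foldl max 0 = runsMax (w :: t) := rfl
      rw [hrm]
      by_cases h6 : (w :: t).length < 6
      · have e3 : ∀ m, 1 ≤ m → pvScan (w :: t) (pvTable (w :: t) 3) 3 (by omega) 0 m = m := by
          intro m hm
          rw [← hsc3]
          exact loop2_small (w :: t) 3 (by omega) (by omega) 0 m hm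
        rw [if_pos h6]
        by_cases h4 : (w :: t).length < 4
        · rw [if_pos h4]
          have e2 : pvScan (w :: t) (pvTable (w :: t) 2) 2 (by omega) 0 (runsMax (w :: t))
              = runsMax (w :: t) := by
            rw [← hsc2]
            exact loop2_small (w :: t) 2 (by omega) (by omega) 0 _ hone
          rw [e2, e3 _ hone, hm1]
        · rw [if_neg h4, hm1, hsc2]
          have hge : 1 ≤ pvScan (w :: t) (pvTable (w :: t) 2) 2 (by omega) 0 (runsMax (w :: t)) :=
            le_trans hone (scan_ge (w :: t) (pvTable (w :: t) 2) 2 (by omega) 0 _)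
          rw [e3 _ hge]
      · rw [if_neg h6, if_neg (show ¬ (w :: t).length < 4 by omega)]
        rw [hm1, hsc2, hsc3]
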